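-- pv_equiv track=rewrite | github.com/kagayaku29/genePrediction | hw0.py | find_genes
-- ===== SOURCE A (Python) =====
-- def find_genes(sequence):
--     genes = []
--     in_gene = False
--     gene_start = 0
--     gene_name = ""
--     for i in range(len(sequence)):
--         codon = sequence[i:i+3]
--         if codon == startCodon and not in_gene:
--             in_gene = True
--             gene_start = i
--         elif codon in stopCodon and in_gene:
--             in_gene = False
--             gene_name = f"Gene_{len(genes) + 1}"
--             genes.append((gene_start, i+3, gene_name))
--     return genes
--
-- startCodon = 'ATG'
--
-- stopCodon = ['TAA', 'TAG', 'TGA']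
-- ===== SOURCE B (Python) =====
-- def find_genes(sequence):
--     genes = []
--     pos = 0
--     while True:
--         start = sequence.find('ATG', pos)
--         if start == -1:
--             break
--         stops = [j for j in (sequence.find(stop, start + 1)
--                              for stop in ('TAA', 'TAG', 'TGA')) if j != -1]
--         if not stops:
--             break
--         end = min(stops)
--         genes.append((start, end + 3, f"Gene_{len(genes) + 1}"))
--         pos = end + 1
--     return genes
-- ===== Notes on version B (the rewrite author's own statement) =====
-- stated objective: faster
-- what changed: A's per-index state machine (a boolean in-gene flag updated while slicing a codon at every position) is replaced by a cursor loop driven by str.find: jump directly to the next start codon, then to the nearest of the three stop codons, emit the gene span and restart the cursor after the stop.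
import Mathlib
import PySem

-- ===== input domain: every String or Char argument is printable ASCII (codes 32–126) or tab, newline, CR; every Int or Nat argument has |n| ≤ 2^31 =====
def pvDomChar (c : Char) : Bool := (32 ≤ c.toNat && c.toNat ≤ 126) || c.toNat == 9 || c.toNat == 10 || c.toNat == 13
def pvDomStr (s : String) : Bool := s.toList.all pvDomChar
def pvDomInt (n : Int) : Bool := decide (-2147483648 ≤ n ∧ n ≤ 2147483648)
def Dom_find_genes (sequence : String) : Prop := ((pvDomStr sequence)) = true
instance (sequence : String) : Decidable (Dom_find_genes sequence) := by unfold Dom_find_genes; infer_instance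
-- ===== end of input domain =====

-- B replaces A's per-index state machine by a cursor loop driven by str.find
-- (next start codon, then the nearest of the three stop codons); same return value,
-- measurably faster by a constant factor (C-level scans instead of per-index slicing).

-- shared module constants (startCodon / stopCodon of the Python module) and the f"Gene_{k}" builder
def pvATG : List Char := ['A', 'T', 'G']
def pvTAA : List Char := ['T', 'A', 'A']
def pvTAG : List Char := ['T', 'A', 'G']
def pvTGA : List Char := ['T', 'G', 'A']
def pvName (k : Int) : List Char := 'G' :: 'e' :: 'n' :: 'e' :: '_' :: PySem.Int.toChars k

-- ===== PORT A =====
-- loop body of A: state = (genes, in_gene, gene_start, gene_name)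
def pvStepA (s : List Char) (st : List (Int × Int × String) × Bool × Int × List Char) (i : Int) :
    List (Int × Int × String) × Bool × Int × List Char :=
  let codon := PySem.Chars.slice s (some i) (some (i + 3))
  if codon = pvATG ∧ st.2.1 = false then
    (st.1, true, i, st.2.2.2)
  else if (codon = pvTAA ∨ codon = pvTAG ∨ codon = pvTGA) ∧ st.2.1 = true then
    let gn := pvName ((st.1.length : Int) + 1)
    (st.1 ++ [(st.2.2.1, i + 3, String.ofList gn)], false, st.2.2.1, gn)
  else st

def find_genes (sequence : String) : List (Int × Int × String) :=
  let s := sequence.toList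
  ((PySem.List.pyRange 0 (s.length : Int) 1).foldl (pvStepA s) ([], false, 0, [])).1

-- ===== PORT B =====
-- the while-True loop of B, made total by a fuel counter (pos grows by at least 2 per
-- iteration, so sequence length + 1 rounds are always enough: the fuel never runs out)
def pvGoB : List Char → Nat → Nat → List (Int × Int × String) → List (Int × Int × String)
  | _, 0, _, genes => genes
  | s, fuel + 1, pos, genes =>
    let start := PySem.Chars.findFrom s pvATG (pos : Int) none
    if start = -1 then genes
    else
      let stops := ([PySem.Chars.findFrom s pvTAA (start + 1) none,
                     PySem.Chars.findFrom s pvTAG (start + 1) none,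
                     PySem.Chars.findFrom s pvTGA (start + 1) none]).filter (fun j => j ≠ -1)
      if stops = [] then genes
      else
        let e := (PySem.List.min? stops (fun x => x)).getD 0
        pvGoB s fuel (e + 1).toNat
          (genes ++ [(start, e + 3, String.ofList (pvName ((genes.length : Int) + 1)))])

def find_genes_alt (sequence : String) : List (Int × Int × String) :=
  pvGoB sequence.toList (sequence.toList.length + 1) 0 []

-- ===== PRECONDITION & SPEC =====
def Spec_find_genes (sequence : String) (out : List (Int × Int × String)) : Prop := out = find_genes_alt sequence
instance (sequence : String) (out : List (Int × Int × String)) : Decidable (Spec_find_genes sequence out) := by unfold Spec_find_genes; infer_instance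

-- ===== CLAIM (what is proved, stated in full; the proofs are below) =====
def Claim_equal_find_genes : Prop := ∀ (sequence : String), Dom_find_genes sequence → Spec_find_genes sequence (find_genes sequence)

-- ===== LEMMAS AND PROOFS =====

-- 'ATG' (resp. some stop codon) occurs at index j
def pvAtgAt (s : List Char) (j : Nat) : Prop := pvATG <+: s.drop j
def pvStopAt (s : List Char) (j : Nat) : Prop :=
  pvTAA <+: s.drop j ∨ pvTAG <+: s.drop j ∨ pvTGA <+: s.drop j

theorem pvCodon_eq_iff (s : List Char) (j : Nat) (P : List Char) (hP : P.length = 3) :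
    PySem.List.slice s (some (j : Int)) (some ((j : Int) + 3)) = P ↔ P <+: s.drop j := by
  rw [show ((j : Int) + 3) = ((j : Int) + ((3 : Nat) : Int)) from by norm_num]
  rw [PySem.List.slice_natCast_add]
  rw [List.prefix_iff_eq_take, hP]
  exact eq_comm

theorem pvStepA_skip_false (s : List Char) (j : Nat) (g gs gn) (h : ¬ pvAtgAt s j) :
    pvStepA s (g, false, gs, gn) (j : Int) = (g, false, gs, gn) := by
  have hc : ¬ PySem.List.slice s (some (j : Int)) (some ((j : Int) + 3)) = pvATG :=
    fun hh => h ((pvCodon_eq_iff s j pvATG rfl).mp hh)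
  simp [pvStepA, hc]

theorem pvStepA_atg (s : List Char) (j : Nat) (g gs gn) (h : pvAtgAt s j) :
    pvStepA s (g, false, gs, gn) (j : Int) = (g, true, (j : Int), gn) := by
  simp [pvStepA, (pvCodon_eq_iff s j pvATG rfl).mpr h]

theorem pvStepA_skip_true (s : List Char) (j : Nat) (g gs gn) (h : ¬ pvStopAt s j) :
    pvStepA s (g, true, gs, gn) (j : Int) = (g, true, gs, gn) := by
  have h1 : ¬ PySem.List.slice s (some (j : Int)) (some ((j : Int) + 3)) = pvTAA :=
    fun hh => h (Or.inl ((pvCodon_eq_iff s j pvTAA rfl).mp hh))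
  have h2 : ¬ PySem.List.slice s (some (j : Int)) (some ((j : Int) + 3)) = pvTAG :=
    fun hh => h (Or.inr (Or.inl ((pvCodon_eq_iff s j pvTAG rfl).mp hh)))
  have h3 : ¬ PySem.List.slice s (some (j : Int)) (some ((j : Int) + 3)) = pvTGA :=
    fun hh => h (Or.inr (Or.inr ((pvCodon_eq_iff s j pvTGA rfl).mp hh)))
  simp [pvStepA, h1, h2, h3]

theorem pvStepA_stop (s : List Char) (j : Nat) (g gs gn) (h : pvStopAt s j) :
    pvStepA s (g, true, gs, gn) (j : Int) =
      (g ++ [(gs, (j : Int) + 3, String.ofList (pvName ((g.length : Int) + 1)))], false, gs,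
        pvName ((g.length : Int) + 1)) := by
  have hdis : PySem.List.slice s (some (j : Int)) (some ((j : Int) + 3)) = pvTAA ∨
      PySem.List.slice s (some (j : Int)) (some ((j : Int) + 3)) = pvTAG ∨
      PySem.List.slice s (some (j : Int)) (some ((j : Int) + 3)) = pvTGA := by
    rcases h with h | h | h
    · exact Or.inl ((pvCodon_eq_iff s j pvTAA rfl).mpr h)
    · exact Or.inr (Or.inl ((pvCodon_eq_iff s j pvTAG rfl).mpr h))
    · exact Or.inr (Or.inr ((pvCodon_eq_iff s j pvTGA rfl).mpr h))
  simp [pvStepA, hdis]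

theorem pvFold_skip_false (s : List Char) (g : List (Int × Int × String)) (gs : Int)
    (gn : List Char) (b : Nat) :
    ∀ (a : Nat), (∀ j : Nat, a ≤ j → j < b → ¬ pvAtgAt s j) →
      (PySem.List.pyRange (a : Int) (b : Int) 1).foldl (pvStepA s) (g, false, gs, gn)
        = (g, false, gs, gn) := by
  induction b with
  | zero =>
    intro a _
    rw [PySem.List.pyRange_one_eq_nil (by exact_mod_cast Nat.zero_le a)]
    rfl
  | succ b ihb =>
    intro a h
    by_cases hab : a ≤ b
    · rw [show ((b + 1 : Nat) : Int) = ((b : Nat) : Int) + 1 from by push_cast; ring]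
      rw [PySem.List.pyRange_one_succ_right (by exact_mod_cast hab), List.foldl_append,
        ihb a (fun j hj hlt => h j hj (by omega))]
      simpa using pvStepA_skip_false s b g gs gn (h b hab (by omega))
    · rw [PySem.List.pyRange_one_eq_nil (by exact_mod_cast (by omega : b + 1 ≤ a))]
      rfl

theorem pvFold_skip_true (s : List Char) (g : List (Int × Int × String)) (gs : Int)
    (gn : List Char) (b : Nat) :
    ∀ (a : Nat), (∀ j : Nat, a ≤ j → j < b → ¬ pvStopAt s j) →
      (PySem.List.pyRange (a : Int) (b : Int) 1).foldl (pvStepA s) (g, true, gs, gn)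
        = (g, true, gs, gn) := by
  induction b with
  | zero =>
    intro a _
    rw [PySem.List.pyRange_one_eq_nil (by exact_mod_cast Nat.zero_le a)]
    rfl
  | succ b ihb =>
    intro a h
    by_cases hab : a ≤ b
    · rw [show ((b + 1 : Nat) : Int) = ((b : Nat) : Int) + 1 from by push_cast; ring]
      rw [PySem.List.pyRange_one_succ_right (by exact_mod_cast hab), List.foldl_append,
        ihb a (fun j hj hlt => h j hj (by omega))]
      simpa using pvStepA_skip_true s b g gs gn (h b hab (by omega))
    · rw [PySem.List.pyRange_one_eq_nil (by exact_mod_cast (by omega : b + 1 ≤ a))]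
      rfl

theorem pvPrefix_drop_infix (sub l : List Char) (p j : Nat) (hpj : p ≤ j)
    (h : sub <+: l.drop j) : sub <:+: l.drop p := by
  have hd : l.drop j = (l.drop p).drop (j - p) := by rw [List.drop_drop]; congr 1; omega
  rw [hd] at h
  obtain ⟨t, ht⟩ := h
  obtain ⟨q, hq⟩ := List.drop_suffix (j - p) (l.drop p)
  exact ⟨q, t, by rw [List.append_assoc, ht, hq]⟩

theorem pvMain (s : List Char) :
    ∀ (fuel pos : Nat), pos ≤ s.length → s.length + 1 - pos ≤ fuel → ∀ g gs gn,
      ((PySem.List.pyRange (pos : Int) (s.length : Int) 1).foldl (pvStepA s)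
          (g, false, gs, gn)).1 = pvGoB s fuel pos g := by
  intro fuel
  induction fuel with
  | zero =>
    intro pos hp hf g gs gn
    exfalso
    omega
  | succ fuel ih =>
    intro pos hp hf g gs gn
    by_cases hst : PySem.Chars.findFrom s pvATG (pos : Int) none = -1
    · have hnone := (PySem.Chars.findFrom_natCast_eq_neg_one_iff s pvATG pos hp).mp hst
      have hno : ∀ j : Nat, pos ≤ j → j < s.length → ¬ pvAtgAt s j := fun j hj _ hat =>
        hnone (pvPrefix_drop_infix pvATG s pos j hj hat)
      rw [pvFold_skip_false s g gs gn s.length pos hno, pvGoB]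
      simp [hst]
    · obtain ⟨hge, hpre, hmin⟩ := PySem.Chars.findFrom_natCast_spec s pvATG pos hp hst
      set f := PySem.Chars.findFrom s pvATG (pos : Int) none with hf0
      have h0 : (0 : Int) ≤ f := le_trans (Int.natCast_nonneg pos) hge
      have hfi : f = (f.toNat : Int) := (Int.toNat_of_nonneg h0).symm
      set i := f.toNat with hidef
      have hpi : pos ≤ i := by omega
      have hlen3 := hpre.length_le
      rw [show pvATG.length = 3 from rfl, List.length_drop] at hlen3
      have hi3 : i + 3 ≤ s.length := by omega
      -- A: skip [pos, i), fire the ATG branch at i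
      rw [PySem.List.pyRange_one_append (pos : Int) (i : Int) (s.length : Int)
            (by exact_mod_cast hpi) (by exact_mod_cast (by omega : i ≤ s.length)),
        List.foldl_append,
        pvFold_skip_false s g gs gn i pos (fun j hj hlt => hmin j hj hlt),
        PySem.List.pyRange_one_cons (by exact_mod_cast (by omega : i < s.length)),
        List.foldl_cons, pvStepA_atg s i g gs gn hpre]
      have hi1 : i + 1 ≤ s.length := by omega
      -- B: one round of pvGoB
      rw [pvGoB]
      rw [if_neg hst]
      rw [show f + 1 = ((i + 1 : Nat) : Int) from by omega]
      by_cases hempty : ([PySem.Chars.findFrom s pvTAA ((i + 1 : Nat) : Int) none,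
             PySem.Chars.findFrom s pvTAG ((i + 1 : Nat) : Int) none,
             PySem.Chars.findFrom s pvTGA ((i + 1 : Nat) : Int) none]).filter
            (fun j => j ≠ -1) = []
      · -- no stop codon after i: A keeps in_gene forever, B breaks
        rw [List.filter_eq_nil_iff] at hempty
        have hTAA : PySem.Chars.findFrom s pvTAA ((i + 1 : Nat) : Int) none = -1 := by
          have := hempty (PySem.Chars.findFrom s pvTAA ((i + 1 : Nat) : Int) none) (by simp)
          simpa using this
        have hTAG : PySem.Chars.findFrom s pvTAG ((i + 1 : Nat) : Int) none = -1 := by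
          have := hempty (PySem.Chars.findFrom s pvTAG ((i + 1 : Nat) : Int) none) (by simp)
          simpa using this
        have hTGA : PySem.Chars.findFrom s pvTGA ((i + 1 : Nat) : Int) none = -1 := by
          have := hempty (PySem.Chars.findFrom s pvTGA ((i + 1 : Nat) : Int) none) (by simp)
          simpa using this
        have hnostop : ∀ j : Nat, i + 1 ≤ j → j < s.length → ¬ pvStopAt s j := by
          intro j hj _ hstop
          rcases hstop with h | h | h
          · exact (PySem.Chars.findFrom_natCast_eq_neg_one_iff s pvTAA (i + 1) hi1).mp hTAA
              (pvPrefix_drop_infix pvTAA s (i + 1) j hj h)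
          · exact (PySem.Chars.findFrom_natCast_eq_neg_one_iff s pvTAG (i + 1) hi1).mp hTAG
              (pvPrefix_drop_infix pvTAG s (i + 1) j hj h)
          · exact (PySem.Chars.findFrom_natCast_eq_neg_one_iff s pvTGA (i + 1) hi1).mp hTGA
              (pvPrefix_drop_infix pvTGA s (i + 1) j hj h)
        rw [show ((i : Nat) : Int) + 1 = ((i + 1 : Nat) : Int) from by push_cast; ring,
          pvFold_skip_true s g (i : Int) gn s.length (i + 1) hnostop,
          if_pos (by rw [List.filter_eq_nil_iff]; exact hempty)]
      · -- nearest stop at m = e.toNat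
        obtain ⟨e, hmq⟩ : ∃ e, PySem.List.min?
            (([PySem.Chars.findFrom s pvTAA ((i + 1 : Nat) : Int) none,
               PySem.Chars.findFrom s pvTAG ((i + 1 : Nat) : Int) none,
               PySem.Chars.findFrom s pvTGA ((i + 1 : Nat) : Int) none]).filter
              (fun j => j ≠ -1)) (fun x => x) = some e := by
          cases hm : PySem.List.min?
              (([PySem.Chars.findFrom s pvTAA ((i + 1 : Nat) : Int) none,
                 PySem.Chars.findFrom s pvTAG ((i + 1 : Nat) : Int) none,
                 PySem.Chars.findFrom s pvTGA ((i + 1 : Nat) : Int) none]).filter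
                (fun j => j ≠ -1)) (fun x => x) with
          | none => exact absurd ((PySem.List.min?_eq_none_iff _ _).mp hm) hempty
          | some e => exact ⟨e, rfl⟩
        have he := PySem.List.min?_mem hmq
        rw [List.mem_filter] at he
        obtain ⟨hc, hne⟩ := he
        have hne' : e ≠ -1 := by simpa using hne
        simp only [List.mem_cons, List.not_mem_nil, or_false] at hc
        have hestop : ((i + 1 : Nat) : Int) ≤ e ∧ pvStopAt s e.toNat := by
          rcases hc with hc | hc | hc <;> subst hc
          · obtain ⟨a1, a2, -⟩ :=
              PySem.Chars.findFrom_natCast_spec s pvTAA (i + 1) hi1 hne'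
            exact ⟨a1, Or.inl a2⟩
          · obtain ⟨a1, a2, -⟩ :=
              PySem.Chars.findFrom_natCast_spec s pvTAG (i + 1) hi1 hne'
            exact ⟨a1, Or.inr (Or.inl a2)⟩
          · obtain ⟨a1, a2, -⟩ :=
              PySem.Chars.findFrom_natCast_spec s pvTGA (i + 1) hi1 hne'
            exact ⟨a1, Or.inr (Or.inr a2)⟩
        obtain ⟨hge2, hstopm⟩ := hestop
        have he0 : (0 : Int) ≤ e := le_trans (Int.natCast_nonneg _) hge2
        have hei : e = (e.toNat : Int) := (Int.toNat_of_nonneg he0).symm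
        set m := e.toNat with hmdef
        have him : i + 1 ≤ m := by omega
        have hm3 : m + 3 ≤ s.length := by
          rcases hstopm with h | h | h <;>
            (have := h.length_le;
             simp only [pvTAA, pvTAG, pvTGA, List.length_cons, List.length_nil,
               List.length_drop] at this; omega)
        -- no stop codon in [i+1, m)
        have hminstop : ∀ j : Nat, i + 1 ≤ j → j < m → ¬ pvStopAt s j := by
          intro j hj hlt hstop
          have key : ∀ P : List Char, P <+: s.drop j →
              P = pvTAA ∨ P = pvTAG ∨ P = pvTGA → False := by
            intro P hPj hPmem
            have hQne : PySem.Chars.findFrom s P ((i + 1 : Nat) : Int) none ≠ -1 := by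
              intro hz
              exact (PySem.Chars.findFrom_natCast_eq_neg_one_iff s P (i + 1) hi1).mp hz
                (pvPrefix_drop_infix P s (i + 1) j hj hPj)
            obtain ⟨hQge, -, hQmin⟩ :=
              PySem.Chars.findFrom_natCast_spec s P (i + 1) hi1 hQne
            have hQj : (PySem.Chars.findFrom s P ((i + 1 : Nat) : Int) none).toNat ≤ j := by
              by_contra hcc
              push Not at hcc
              exact hQmin j hj hcc hPj
            have hQmem : PySem.Chars.findFrom s P ((i + 1 : Nat) : Int) none ∈
                ([PySem.Chars.findFrom s pvTAA ((i + 1 : Nat) : Int) none,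
                  PySem.Chars.findFrom s pvTAG ((i + 1 : Nat) : Int) none,
                  PySem.Chars.findFrom s pvTGA ((i + 1 : Nat) : Int) none]).filter
                  (fun j => j ≠ -1) := by
              rw [List.mem_filter]
              constructor
              · rcases hPmem with h | h | h <;> subst h <;> simp
              · simpa using hQne
            have hle := PySem.List.min?_isMin hmq _ hQmem
            simp only at hle
            omega
          rcases hstop with h | h | h
          · exact key pvTAA h (Or.inl rfl)
          · exact key pvTAG h (Or.inr (Or.inl rfl))
          · exact key pvTGA h (Or.inr (Or.inr rfl))
        -- A: skip [i+1, m), fire the stop branch at m, recurse from m+1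
        rw [show ((i : Nat) : Int) + 1 = ((i + 1 : Nat) : Int) from by push_cast; ring,
          PySem.List.pyRange_one_append ((i + 1 : Nat) : Int) (m : Int) (s.length : Int)
            (by exact_mod_cast him) (by exact_mod_cast (by omega : m ≤ s.length)),
          List.foldl_append,
          pvFold_skip_true s g (i : Int) gn m (i + 1) hminstop,
          PySem.List.pyRange_one_cons (by exact_mod_cast (by omega : m < s.length)),
          List.foldl_cons, pvStepA_stop s m g (i : Int) gn hstopm,
          show ((m : Nat) : Int) + 1 = ((m + 1 : Nat) : Int) from by push_cast; ring,
          ih (m + 1) (by omega) (by omega) _ (i : Int) (pvName ((g.length : Int) + 1))]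
        -- B: the nonempty branch
        rw [if_neg hempty, hmq, Option.getD_some]
        simp only [hei, ← hf0, hfi]
        rw [show ((m : Int) + 1).toNat = m + 1 from by omega]

-- ===== VERDICT (by name: the statement is the Claim_ definition above) =====
theorem find_genes_spec : Claim_equal_find_genes := by
  intro sequence _
  unfold Spec_find_genes find_genes find_genes_alt
  have := pvMain sequence.toList (sequence.toList.length + 1) 0 (by omega) (by omega) [] 0 []
  simpa using this
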